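-- pv_equiv track=rewrite | github.com/azymohliad/qb-prompt | generate.py | convert_formatting
-- ===== SOURCE A (Python) =====
-- F_BOLD           = "\e[1m"
--
-- F_ITALIC         = "\e[3m"
--
-- def convert_formatting(fmt):
--     if all([ch in 'bi' for ch in fmt]):
--         code = ''
--         if fmt.find('b') != -1: code += F_BOLD
--         if fmt.find('i') != -1: code += F_ITALIC
--         return code
--     else:
--         return None
-- ===== SOURCE B (Python) =====
-- F_BOLD           = "\e[1m"
--
-- F_ITALIC         = "\e[3m"
--
-- def convert_formatting(fmt):
--     has_bold = False
--     has_italic = False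
--     for ch in fmt:
--         if ch == 'b':
--             has_bold = True
--         elif ch == 'i':
--             has_italic = True
--         else:
--             return None
--     code = ''
--     if has_bold: code += F_BOLD
--     if has_italic: code += F_ITALIC
--     return code
-- ===== Notes on version B (the rewrite author's own statement) =====
-- stated objective: simpler
-- what changed: Replaces A's validate-then-two-find-scans (a materialized comprehension list plus two str.find passes) with a single early-returning pass that maintains has_bold/has_italic flags and assembles the code afterwards.
import Mathlib
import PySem

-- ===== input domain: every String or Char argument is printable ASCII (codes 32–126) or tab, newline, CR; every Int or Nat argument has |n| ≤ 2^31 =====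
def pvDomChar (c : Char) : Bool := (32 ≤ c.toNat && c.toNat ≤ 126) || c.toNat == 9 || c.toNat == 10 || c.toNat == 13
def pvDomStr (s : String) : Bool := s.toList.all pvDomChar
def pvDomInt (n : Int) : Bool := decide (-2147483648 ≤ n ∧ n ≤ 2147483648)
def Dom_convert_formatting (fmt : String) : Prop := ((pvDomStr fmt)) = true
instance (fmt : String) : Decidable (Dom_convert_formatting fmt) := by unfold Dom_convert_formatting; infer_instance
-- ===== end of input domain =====

-- B is a single early-returning pass maintaining bold/italic flags instead of A's
-- validate-comprehension plus two find scans (objective: simpler; same O(n) cost).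
-- Note: the Python source "\e[1m" contains a literal backslash and 'e' (no such escape).

-- ===== PORT A =====
def pvF_BOLD : String := "\\e[1m"
def pvF_ITALIC : String := "\\e[3m"

def convert_formatting (fmt : String) : Option String :=
  if (fmt.toList.map (fun ch => PySem.Str.isIn (String.ofList [ch]) "bi")).all (· == true) then
    let code : String := ""
    let code := if PySem.Str.find fmt "b" ≠ -1 then code ++ pvF_BOLD else code
    let code := if PySem.Str.find fmt "i" ≠ -1 then code ++ pvF_ITALIC else code
    some code
  else
    none

-- ===== PORT B =====
def cfLoop : List Char → Bool → Bool → Option (Bool × Bool)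
  | [], hb, hi => some (hb, hi)
  | ch :: rest, hb, hi =>
    if ch = 'b' then cfLoop rest true hi
    else if ch = 'i' then cfLoop rest hb true
    else none

def convert_formatting_alt (fmt : String) : Option String :=
  match cfLoop fmt.toList false false with
  | none => none
  | some (hb, hi) =>
    let code : String := ""
    let code := if hb then code ++ pvF_BOLD else code
    let code := if hi then code ++ pvF_ITALIC else code
    some code

-- ===== PRECONDITION & SPEC =====
def Spec_convert_formatting (fmt : String) (out : Option String) : Prop := out = convert_formatting_alt fmt
instance (fmt : String) (out : Option String) : Decidable (Spec_convert_formatting fmt out) := by unfold Spec_convert_formatting; infer_instance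

-- ===== CLAIM (what is proved, stated in full; the proofs are below) =====
def Claim_equal_convert_formatting : Prop := ∀ (fmt : String), Dom_convert_formatting fmt → Spec_convert_formatting fmt (convert_formatting fmt)

-- ===== LEMMAS AND PROOFS =====

theorem singleton_infix_iff {c : Char} {l : List Char} : [c] <:+: l ↔ c ∈ l := by
  constructor
  · rintro ⟨s, t, rfl⟩; simp
  · intro h
    obtain ⟨s, t, rfl⟩ := List.append_of_mem h
    exact ⟨s, t, by simp⟩

theorem char_in_bi_iff (c : Char) :
    PySem.Chars.isIn [c] ['b', 'i'] = true ↔ (c = 'b' ∨ c = 'i') := by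
  rw [PySem.Chars.isIn_iff_infix, singleton_infix_iff]; simp

theorem cfLoop_spec (l : List Char) (hb hi : Bool) :
    cfLoop l hb hi =
      if l.all (fun c => c = 'b' ∨ c = 'i') then
        some (hb || l.contains 'b', hi || l.contains 'i')
      else none := by
  induction l generalizing hb hi with
  | nil => simp [cfLoop]
  | cons c rest ih =>
    by_cases hrest : rest.all (fun c => decide (c = 'b' ∨ c = 'i')) = true <;>
      by_cases hcb : c = 'b' <;> by_cases hci : c = 'i' <;>
        simp [cfLoop, ih, List.all_cons, hcb, hci]

theorem find_char_eq (fmt : String) (c : Char) :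
    (PySem.Chars.find fmt.toList [c] = -1) ↔ c ∉ fmt.toList := by
  rw [PySem.Chars.find_eq_neg_one_iff, singleton_infix_iff]

-- ===== VERDICT (by name: the statement is the Claim_ definition above) =====
theorem convert_formatting_spec : Claim_equal_convert_formatting := by
  intro fmt _
  show convert_formatting fmt = convert_formatting_alt fmt
  unfold convert_formatting convert_formatting_alt
  rw [cfLoop_spec]
  have hall : (fmt.toList.map (fun ch => PySem.Str.isIn (String.ofList [ch]) "bi")).all (· == true)
      = fmt.toList.all (fun c => c = 'b' ∨ c = 'i') := by
    rw [List.all_map]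
    congr 1
    funext c
    rw [Bool.eq_iff_iff]
    simp [char_in_bi_iff c]
  rw [hall]
  by_cases h : fmt.toList.all (fun c => c = 'b' ∨ c = 'i') = true
  · simp only [h, if_true]
    simp only [PySem.Str.find_eq]
    simp only [show ("b" : String).toList = ['b'] from by decide,
               show ("i" : String).toList = ['i'] from by decide,
               Bool.false_or, List.contains_eq_mem]
    by_cases hbm : 'b' ∈ fmt.toList <;> by_cases him : 'i' ∈ fmt.toList <;>
      simp [find_char_eq, hbm, him]
  · simp only [h]; simp
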